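-- pv_equiv track=rewrite | github.com/BellOne4222/Coding_Test_Repo | 백준/Silver/1713. 후보 추천하기/후보 추천하기.py | solution
-- ===== SOURCE A (Python) =====
-- import heapq
--
-- def solution(n, data):
--     student = {}  # 학생들의 추천 횟수를 저장하는 딕셔너리
--
--     # 추천된 학생 번호 리스트인 data를 순회
--     for s in data:
--         if s not in student:  # 학생이 아직 사진틀에 없는 경우
--             if len(student) >= n:  # 사진틀이 꽉 찬 경우
--                 # 추천 횟수가 가장 적은 학생을 찾는다
--                 a = heapq.nsmallest(min(student), student, key=student.get)
--                 student.pop(a[0])  # 해당 학생을 사진틀에서 제거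
--
--             student[s] = 1  # 새로운 학생을 사진틀에 추가하고, 추천 횟수를 1로 설정
--         else:
--             student[s] += 1  # 이미 사진틀에 있는 학생이라면 추천 횟수를 증가시킴
--
--     # 최종적으로 사진틀에 남아 있는 학생들의 번호를 오름차순으로 정렬하여 반환
--     return sorted(student.keys())
-- ===== SOURCE B (Python) =====
-- # Priority-ordered frame: entries (count, seq, id) kept ascending, so the eviction
-- # victim is always frame[0]; a recommendation moves its entry to its new rank.
-- def solution(n, data):
--     frame = []  # (count, seq, id) in ascending tuple order; frame[0] = next victim
--     t = 0       # next insertion timestamp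
--     for s in data:
--         hit = None
--         for e in frame:
--             if e[2] == s:
--                 hit = e
--                 break
--         if hit is not None:
--             frame = place([e for e in frame if e != hit], (hit[0] + 1, hit[1], s))
--         else:
--             if len(frame) >= n:
--                 frame = frame[1:]
--             frame = place(frame, (1, t, s))
--             t += 1
--     return sorted(e[2] for e in frame)
--
--
-- def place(frame, e):
--     # insert e into the ascending list frame, keeping it ascending
--     k = 0
--     while k < len(frame) and frame[k] < e:
--         k += 1
--     return frame[:k] + [e] + frame[k:]
-- ===== Notes on version B (the rewrite author's own statement) =====
-- stated objective: alternative
-- what changed: Replaces A's dict plus heapq.nsmallest(min(keys)) stable-sort-at-eviction with a priority queue kept as an ascending list of (count, insertion-timestamp, id) triples: the eviction victim is always frame[0] (O(1) pop), and a repeat recommendation moves its entry to its new rank, so no sort or min scan ever happens at eviction.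
-- outside the precondition, e.g. on solution(2, [2, 3, -1]): A returns [-1, 3], B returns [-1, 3]
import Mathlib
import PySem

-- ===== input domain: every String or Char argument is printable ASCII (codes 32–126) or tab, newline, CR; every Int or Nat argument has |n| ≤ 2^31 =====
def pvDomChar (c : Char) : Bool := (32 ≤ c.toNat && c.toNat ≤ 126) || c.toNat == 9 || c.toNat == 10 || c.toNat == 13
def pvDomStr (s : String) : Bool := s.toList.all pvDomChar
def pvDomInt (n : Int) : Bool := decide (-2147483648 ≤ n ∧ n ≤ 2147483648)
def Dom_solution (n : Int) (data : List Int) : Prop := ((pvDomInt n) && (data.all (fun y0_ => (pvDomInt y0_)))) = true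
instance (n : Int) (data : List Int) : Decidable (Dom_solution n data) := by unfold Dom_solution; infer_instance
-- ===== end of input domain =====

-- B replaces A's dict + heapq.nsmallest(min(keys)) stable-sort eviction by a priority queue kept
-- as an ascending list of (count, timestamp, id) triples: frame[0] is always the eviction victim
-- and a repeat recommendation moves its entry to its new rank (objective: alternative).

-- ===== PORT A =====
-- one iteration of A's 'for s in data' loop over the dict 'student'
def solutionStep (n : Int) (student : PySem.Dict Int Int) (s : Int) : PySem.Dict Int Int :=
  if ¬ (student.contains s = true) then                       -- if s not in student
    let student :=
      if n ≤ (student.size : Int) then                        -- if len(student) >= n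
        match PySem.List.min? student.keys (fun k => k) with  -- min(student)  (ValueError on empty dict: excluded by Pre_)
        | none => student
        | some m =>
          -- heapq.nsmallest(k, iterable, key) is sorted(iterable, key=key)[:k]; iterating a dict
          -- yields its keys, and key=student.get is total on them (ported as getD)
          let a := (PySem.List.sorted student.keys (fun k => student.getD k 0) false).take m.toNat
          match PySem.List.pyGet? a 0 with                    -- a[0]  (IndexError when a = []: excluded by Pre_)
          | none => student
          | some k0 => student.erase k0                       -- student.pop(a[0])
      else student
    student.insert s 1                                        -- student[s] = 1
  else student.insert s (student.getD s 0 + 1)                -- student[s] += 1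

def solution (n : Int) (data : List Int) : List Int :=
  PySem.List.sorted (data.foldl (solutionStep n) PySem.Dict.empty).keys (fun k => k) false

-- ===== PORT B =====
-- Python tuple '<' on (count, seq, id) triples (lexicographic)
def lt3 (a b : Int × Int × Int) : Bool :=
  decide (a.1 < b.1 ∨ (a.1 = b.1 ∧ (a.2.1 < b.2.1 ∨ (a.2.1 = b.2.1 ∧ a.2.2 < b.2.2))))

-- Source B's 'place': scan to the first index whose entry is not < e, insert e there
def place : List (Int × Int × Int) → (Int × Int × Int) → List (Int × Int × Int)
  | [], e => [e]
  | f :: fs, e => if lt3 f e then f :: place fs e else e :: f :: fs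

-- one iteration of Source B's 'for s in data' loop; state = (frame, t)
def solAltStep (n : Int) (st : List (Int × Int × Int) × Int) (s : Int) :
    List (Int × Int × Int) × Int :=
  match st.1.find? (fun e => e.2.2 == s) with                 -- the for/break search for hit
  | some hit => (place (st.1.filter (fun e => e != hit)) (hit.1 + 1, hit.2.1, s), st.2)
  | none =>
      let frame := if n ≤ (st.1.length : Int) then PySem.List.slice st.1 (some 1) none else st.1
      (place frame (1, st.2, s), st.2 + 1)

def solution_alt (n : Int) (data : List Int) : List Int :=
  PySem.List.sorted ((data.foldl (solAltStep n) ([], 0)).1.map (fun e => e.2.2)) (fun i => i) false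

-- ===== PRECONDITION & SPEC =====
-- Pre_ excludes exactly the inputs on which A's eviction machinery can raise: a nonempty data with
-- n < 1 (min() of an empty dict, ValueError), and data whose ids can overflow the frame while a
-- nonpositive id is present (then nsmallest is called with k = min(keys) <= 0, so a[0] is IndexError);
-- in the latter family A still returns on some inputs (eviction may happen to avoid the nonpositive id).
def Pre_solution (n : Int) (data : List Int) : Prop :=
  data = [] ∨ (1 ≤ n ∧ (((PySem.List.dedup data).length : Int) ≤ n ∨ ∀ s ∈ data, 1 ≤ s))
instance (n : Int) (data : List Int) : Decidable (Pre_solution n data) := by unfold Pre_solution; infer_instance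

def pvWitness_solution : Int × List Int := (2, [1, 2, 3, 1, 2])

def Spec_solution (n : Int) (data : List Int) (out : List Int) : Prop := out = solution_alt n data
instance (n : Int) (data : List Int) (out : List Int) : Decidable (Spec_solution n data out) := by unfold Spec_solution; infer_instance

-- ===== CLAIM (what is proved, stated in full; the proofs are below) =====
def Claim_equal_solution : Prop := ∀ (n : Int) (data : List Int), Dom_solution n data → Pre_solution n data → Spec_solution n data (solution n data)

-- ===== LEMMAS AND PROOFS =====

-- proof-only reference machine: the frame as an insertion-ordered (id, count) list; it bridges
-- A's dict (same items) and B's priority-ordered frame (same multiset, annotated with timestamps)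
def refStep (n : Int) (frame : List (Int × Int)) (s : Int) : List (Int × Int) :=
  if frame.any (fun e => e.1 == s) then
    frame.map (fun e => if e.1 == s then (e.1, e.2 + 1) else e)
  else
    let frame :=
      if n ≤ (frame.length : Int) then
        match PySem.List.min? frame (fun e => e.2) with
        | none => frame
        | some v => frame.filter (fun e => e != v)
      else frame
    frame ++ [(s, 1)]

-- head of a Python-stable insertion step behaves like the first-minimum fold step
lemma head?_insertBy {α κ : Type} [LinearOrder κ] (key : α → κ) (x : α) (acc : List α) :
    (PySem.List.insertBy (fun a b => decide (key a < key b)) x acc).head? =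
      (match acc.head? with
       | none => some x
       | some m => if key x < key m then some x else some m) := by
  cases acc with
  | nil => simp [PySem.List.insertBy]
  | cons y ys =>
    by_cases h : key x < key y <;> simp [PySem.List.insertBy, h]

lemma head?_foldl_insertBy {α κ : Type} [LinearOrder κ] (key : α → κ) (xs : List α) (acc : List α) :
    (xs.foldl (fun a x => PySem.List.insertBy (fun a b => decide (key a < key b)) x a) acc).head? =
      xs.foldl
        (fun o x =>
          match o with
          | none => some x
          | some m => if key x < key m then some x else some m)
        acc.head? := by
  induction xs generalizing acc with
  | nil => rfl
  | cons x xs ih =>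
    simp only [List.foldl_cons]
    rw [ih, head?_insertBy]

-- min(xs, key) is the head of Python's stable sort by the same key
lemma min?_eq_head_sorted {α κ : Type} [LinearOrder κ] (xs : List α) (key : α → κ) :
    PySem.List.min? xs key = (PySem.List.sorted xs key false).head? := by
  rw [PySem.List.sorted_eq_foldl_insertBy, head?_foldl_insertBy]
  rfl

-- min over a mapped list
lemma min?_map_aux {α β κ : Type} [LinearOrder κ] (f : α → β) (key : β → κ) (xs : List α)
    (o : Option α) :
    xs.foldl
        (fun acc a => match acc with
          | none => some (f a)
          | some m => if key (f a) < key m then some (f a) else some m)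
        (o.map f) =
      (xs.foldl
        (fun acc a => match acc with
          | none => some a
          | some m => if key (f a) < key (f m) then some a else some m)
        o).map f := by
  induction xs generalizing o with
  | nil => rfl
  | cons x xs ih =>
    simp only [List.foldl_cons]
    have h : (match o.map f with
        | none => some (f x)
        | some m => if key (f x) < key m then some (f x) else some m) =
        (match o with
        | none => some x
        | some m => if key (f x) < key (f m) then some x else some m).map f := by
      cases o with
      | none => rfl
      | some m => by_cases h : key (f x) < key (f m) <;> simp [h]
    rw [h, ih]

lemma min?_map {α β κ : Type} [LinearOrder κ] (f : α → β) (xs : List α) (key : β → κ) :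
    PySem.List.min? (xs.map f) key = Option.map f (PySem.List.min? xs (fun a => key (f a))) := by
  show (xs.map f).foldl _ none = _
  rw [List.foldl_map]
  exact min?_map_aux f key xs none

-- one step of A, seen through its items, is one step of the reference machine (under the no-raise hypothesis)
lemma step_items (n : Int) (d : PySem.Dict Int Int) (s : Int)
    (hnd : d.keys.Nodup)
    (hsafe : d.contains s = false → n ≤ (d.size : Int) →
      ∃ m, PySem.List.min? d.keys (fun k => k) = some m ∧ 1 ≤ m) :
    (solutionStep n d s).items = refStep n d.items s := by
  have hany : d.items.any (fun e => e.1 == s) = d.contains s := rfl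
  by_cases hc : d.contains s = true
  · -- s already in the frame: A overwrites in place, the reference maps over the list
    rw [solutionStep, refStep,
      if_neg (show ¬¬(d.contains s = true) by simp [hc]),
      if_pos (show (d.items.any fun e => e.1 == s) = true by rw [hany, hc])]
    rw [PySem.Dict.items_insert_of_contains d _ hc]
    apply List.map_congr_left
    intro p hp
    by_cases hps : p.1 = s
    · have hmem : (s, p.2) ∈ d.items := by
        have hps' : p = (s, p.2) := by cases p; simp_all
        rw [← hps']; exact hp
      have hget : d.getD s 0 = p.2 := PySem.Dict.getD_of_mem_items d hmem hnd 0
      simp [hps, hget]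
    · simp [hps]
  · -- s is new
    have hc' : d.contains s = false := by simpa using hc
    rw [solutionStep, refStep,
      if_pos (show ¬(d.contains s = true) by simp [hc']),
      if_neg (show ¬((d.items.any fun e => e.1 == s) = true) by rw [hany, hc']; simp)]
    have hsz : (d.items.length : Int) = (d.size : Int) := rfl
    by_cases hfull : n ≤ (d.size : Int)
    · -- eviction in both programs
      obtain ⟨m, hm, hm1⟩ := hsafe hc' hfull
      have hkne : d.keys ≠ [] := by
        intro h
        rw [← PySem.List.min?_eq_none_iff d.keys (fun k => (k : Int))] at h
        rw [hm] at h; cases h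
      obtain ⟨k0, hk0⟩ : ∃ k0, PySem.List.min? d.keys (fun k => d.getD k 0) = some k0 := by
        cases hmin : PySem.List.min? d.keys (fun k => d.getD k 0) with
        | none => exact absurd ((PySem.List.min?_eq_none_iff _ _).mp hmin) hkne
        | some k0 => exact ⟨k0, rfl⟩
      -- A picks a[0] = head of the stable sort = the first minimal-count key
      have hhead : (PySem.List.sorted d.keys (fun k => d.getD k 0) false).head? = some k0 := by
        rw [← min?_eq_head_sorted]; exact hk0
      have hget0 : PySem.List.pyGet?
          ((PySem.List.sorted d.keys (fun k => d.getD k 0) false).take m.toNat) 0 = some k0 := by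
        rw [PySem.List.pyGet?_zero, List.getElem?_take_of_lt (by omega), ← List.head?_eq_getElem?]
        exact hhead
      -- the reference picks the first minimal-count item
      have hitems : d.items = d.keys.map (fun k => (k, d.getD k 0)) :=
        PySem.Dict.items_eq_map_keys d hnd 0
      have hminB : PySem.List.min? d.items (fun e => e.2) = some (k0, d.getD k0 0) := by
        rw [hitems, min?_map (fun k => ((k : Int), d.getD k 0)) d.keys (fun e => e.2)]
        simp only [hk0, Option.map_some]
      rw [if_pos hfull, if_pos (show n ≤ (d.items.length : Int) by rw [hsz]; exact hfull)]
      simp only [hm, hminB, hget0]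
      -- the two removals delete the same entry
      have hfilter : d.items.filter (fun p => !(p.1 == k0)) =
          d.items.filter (fun e => e != (k0, d.getD k0 0)) := by
        apply List.filter_congr
        intro p hp
        by_cases hpk : p.1 = k0
        · have hmem : (k0, p.2) ∈ d.items := by
            have hps' : p = (k0, p.2) := by cases p; simp_all
            rw [← hps']; exact hp
          have hget : d.getD k0 0 = p.2 := PySem.Dict.getD_of_mem_items d hmem hnd 0
          have hpeq : p = (k0, d.getD k0 0) := by cases p; simp_all
          simp [hpeq]
        · have hne : p ≠ (k0, d.getD k0 0) := by
            intro h; exact hpk (by rw [h])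
          have h1 : (p.1 == k0) = false := by simp [hpk]
          have h2 : (p != (k0, d.getD k0 0)) = true := by simp [hne]
          rw [h1, h2]; rfl
      have hcerase : (d.erase k0).contains s = false := by
        rw [PySem.Dict.contains] at hc' ⊢
        rw [PySem.Dict.erase]
        simp only [List.any_eq_false, List.mem_filter] at *
        intro p hp; exact hc' p hp.1
      rw [PySem.Dict.items_insert_of_not_contains _ _ hcerase, PySem.Dict.erase, hfilter]
    · -- frame not full: both append (s, 1)
      rw [if_neg hfull, if_neg (show ¬ n ≤ (d.items.length : Int) by rw [hsz]; exact hfull)]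
      rw [PySem.Dict.items_insert_of_not_contains d _ hc']

-- the keys after one step: unchanged, or a sublist of the old keys with the fresh s appended
lemma step_keys (n : Int) (d : PySem.Dict Int Int) (s : Int) :
    (solutionStep n d s).keys = d.keys ∨
      (s ∉ d.keys ∧ ∃ l, l.Sublist d.keys ∧ (solutionStep n d s).keys = l ++ [s]) := by
  by_cases hc : d.contains s = true
  · left
    rw [solutionStep, if_neg (show ¬¬(d.contains s = true) by simp [hc])]
    exact PySem.Dict.keys_insert_of_contains d _ hc
  · right
    have hc' : d.contains s = false := by simpa using hc
    have hsmem : s ∉ d.keys := fun h => by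
      rw [(PySem.Dict.contains_iff_mem_keys d s).mpr h] at hc'; cases hc'
    refine ⟨hsmem, ?_⟩
    rw [solutionStep, if_pos (show ¬(d.contains s = true) by simp [hc'])]
    by_cases hfull : n ≤ (d.size : Int)
    · rw [if_pos hfull]
      cases hm : PySem.List.min? d.keys (fun k => k) with
      | none =>
        refine ⟨d.keys, List.Sublist.refl _, ?_⟩
        exact PySem.Dict.keys_insert_of_not_contains d _ hc'
      | some m =>
        cases hg : PySem.List.pyGet?
            ((PySem.List.sorted d.keys (fun k => d.getD k 0) false).take m.toNat) 0 with
        | none =>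
          refine ⟨d.keys, List.Sublist.refl _, ?_⟩
          simp only [hg]
          exact PySem.Dict.keys_insert_of_not_contains d _ hc'
        | some k0 =>
          have hcerase : (d.erase k0).contains s = false := by
            rw [PySem.Dict.contains] at hc' ⊢
            rw [PySem.Dict.erase]
            simp only [List.any_eq_false, List.mem_filter] at *
            intro p hp; exact hc' p hp.1
          refine ⟨(d.erase k0).keys, ?_, ?_⟩
          · rw [PySem.Dict.erase, PySem.Dict.keys, PySem.Dict.keys]
            exact List.filter_sublist.map _
          · simp only [hg]
            exact PySem.Dict.keys_insert_of_not_contains _ _ hcerase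
    · rw [if_neg hfull]
      exact ⟨d.keys, List.Sublist.refl _,
        PySem.Dict.keys_insert_of_not_contains d _ hc'⟩

lemma nodup_step (n : Int) (d : PySem.Dict Int Int) (s : Int) (hnd : d.keys.Nodup) :
    (solutionStep n d s).keys.Nodup := by
  rcases step_keys n d s with h | ⟨hs, l, hl, h⟩
  · rw [h]; exact hnd
  · rw [h]
    have hlnd : l.Nodup := hnd.sublist hl
    have hsl : s ∉ l := fun hm => hs (hl.subset hm)
    exact hlnd.append (List.nodup_singleton s)
      (fun a ha hb => hsl ((List.mem_singleton.mp hb) ▸ ha))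

-- the all-positive case: every id seen is ≥ 1, so min(keys) ≥ 1 and evictions are safe
lemma loop_pos (n : Int) (rest : List Int) (d : PySem.Dict Int Int)
    (hn : 1 ≤ n)
    (hrest : ∀ s ∈ rest, 1 ≤ s)
    (hkeys : ∀ k ∈ d.keys, 1 ≤ k) (hnd : d.keys.Nodup) :
    PySem.List.sorted (rest.foldl (solutionStep n) d).keys (fun k => k) false =
      PySem.List.sorted ((rest.foldl (refStep n) d.items).map (fun e => e.1)) (fun i => i) false := by
  induction rest generalizing d with
  | nil => rfl
  | cons s rest ih =>
    have hsafe : d.contains s = false → n ≤ (d.size : Int) →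
        ∃ m, PySem.List.min? d.keys (fun k => k) = some m ∧ 1 ≤ m := by
      intro _ hfull
      have hkne : d.keys ≠ [] := by
        intro h
        have : d.size = 0 := by
          show d.items.length = 0
          have : d.items.map (fun p => p.1) = [] := h
          simpa using congrArg List.length this
        rw [this] at hfull; omega
      cases hm : PySem.List.min? d.keys (fun k => (k : Int)) with
      | none => exact absurd ((PySem.List.min?_eq_none_iff _ _).mp hm) hkne
      | some m => exact ⟨m, rfl, hkeys m (PySem.List.min?_mem hm)⟩
    rw [List.foldl_cons, List.foldl_cons, ← step_items n d s hnd hsafe]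
    apply ih (solutionStep n d s) (fun t ht => hrest t (List.mem_cons_of_mem s ht))
      ?_ (nodup_step n d s hnd)
    intro k hk
    rcases step_keys n d s with h | ⟨_, l, hl, h⟩
    · exact hkeys k (h ▸ hk)
    · rw [h] at hk
      rcases List.mem_append.mp hk with hk | hk
      · exact hkeys k (hl.subset hk)
      · simp only [List.mem_singleton] at hk
        exact hk ▸ hrest s (List.mem_cons_self)

-- length can only grow along Set.update
lemma length_le_update {α : Type} [BEq α] (xs : List α) (s : PySem.Set α) :
    s.length ≤ (PySem.Set.update s xs).length := by
  induction xs generalizing s with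
  | nil => exact le_refl _
  | cons x xs ih =>
    refine le_trans ?_ (ih (PySem.Set.add s x))
    rw [PySem.Set.add]
    split
    · exact le_refl _
    · simp

-- the few-distinct case: the frame never fills up, so no eviction ever happens
lemma loop_small (n : Int) (rest : List Int) (d : PySem.Dict Int Int)
    (hbound : ((PySem.Set.update d.keys rest).length : Int) ≤ n)
    (hnd : d.keys.Nodup) :
    PySem.List.sorted (rest.foldl (solutionStep n) d).keys (fun k => k) false =
      PySem.List.sorted ((rest.foldl (refStep n) d.items).map (fun e => e.1)) (fun i => i) false := by
  induction rest generalizing d with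
  | nil => rfl
  | cons s rest ih =>
    by_cases hc : d.contains s = true
    · have hsafe : d.contains s = false → n ≤ (d.size : Int) →
          ∃ m, PySem.List.min? d.keys (fun k => k) = some m ∧ 1 ≤ m := by
        intro h; rw [h] at hc; cases hc
      rw [List.foldl_cons, List.foldl_cons, ← step_items n d s hnd hsafe]
      have hadd : PySem.Set.add d.keys s = d.keys := by
        rw [PySem.Set.add, if_pos]
        have : s ∈ d.keys := (PySem.Dict.contains_iff_mem_keys d s).mp hc
        exact List.contains_iff_mem.mpr this
      have hkeq : (solutionStep n d s).keys = d.keys := by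
        rw [solutionStep, if_neg (show ¬¬(d.contains s = true) by simp [hc])]
        exact PySem.Dict.keys_insert_of_contains d _ hc
      apply ih (solutionStep n d s) ?_ (nodup_step n d s hnd)
      rw [hkeq]
      have : PySem.Set.update d.keys (s :: rest) = PySem.Set.update d.keys rest := by
        show PySem.Set.update (PySem.Set.add d.keys s) rest = _
        rw [hadd]
      rw [← this]; exact hbound
    · have hc' : d.contains s = false := by simpa using hc
      have hsmem : s ∉ d.keys := fun h => by
        rw [(PySem.Dict.contains_iff_mem_keys d s).mpr h] at hc'; cases hc'
      have hadd : PySem.Set.add d.keys s = d.keys ++ [s] := by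
        rw [PySem.Set.add, if_neg]
        intro h
        exact hsmem (List.contains_iff_mem.mp h)
      have hupd : PySem.Set.update d.keys (s :: rest) =
          PySem.Set.update (d.keys ++ [s]) rest := by
        show PySem.Set.update (PySem.Set.add d.keys s) rest = _
        rw [hadd]
      have hlen : (d.keys.length : Int) + 1 ≤ n := by
        have h1 : (d.keys ++ [s]).length ≤ (PySem.Set.update (d.keys ++ [s]) rest).length :=
          length_le_update rest (d.keys ++ [s])
        rw [hupd] at hbound
        simp only [List.length_append, List.length_cons, List.length_nil] at h1
        omega
      have hnotfull : ¬ n ≤ (d.size : Int) := by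
        show ¬ n ≤ (d.items.length : Int)
        have : d.items.length = d.keys.length := by
          rw [PySem.Dict.keys, List.length_map]
        omega
      have hsafe : d.contains s = false → n ≤ (d.size : Int) →
          ∃ m, PySem.List.min? d.keys (fun k => k) = some m ∧ 1 ≤ m := by
        intro _ h; exact absurd h hnotfull
      rw [List.foldl_cons, List.foldl_cons, ← step_items n d s hnd hsafe]
      have hkeq : (solutionStep n d s).keys = d.keys ++ [s] := by
        rw [solutionStep, if_pos (show ¬(d.contains s = true) by simp [hc']), if_neg hnotfull]
        exact PySem.Dict.keys_insert_of_not_contains d _ hc'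
      apply ih (solutionStep n d s) ?_ (nodup_step n d s hnd)
      rw [hkeq, ← hupd]
      exact hbound

-- ========== layer 2: the reference machine vs B's priority-ordered frame ==========

-- annotate the insertion-ordered frame with timestamps
def ann (L : List (Int × Int)) (qs : List Int) : List (Int × Int × Int) :=
  List.zipWith (fun p q => (p.2, q, p.1)) L qs

-- the simulation invariant: B's frame is a sorted rearrangement of the reference frame
-- annotated with strictly increasing timestamps, all below the clock t
def SimInv (L : List (Int × Int)) (frame : List (Int × Int × Int)) (t : Int) : Prop :=
  ∃ qs : List Int, qs.length = L.length ∧ qs.Pairwise (· < ·) ∧ (∀ q ∈ qs, q < t) ∧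
    frame.Perm (ann L qs) ∧ frame.Pairwise (fun a b => lt3 a b = true)

lemma lt3_trans {a b c : Int × Int × Int} (h1 : lt3 a b = true) (h2 : lt3 b c = true) :
    lt3 a c = true := by
  simp only [lt3, decide_eq_true_eq] at *
  omega

lemma lt3_total {a b : Int × Int × Int} (h : a ≠ b) : lt3 a b = true ∨ lt3 b a = true := by
  simp only [lt3, decide_eq_true_eq]
  simp only [ne_eq, Prod.ext_iff, not_and] at h
  omega

lemma place_perm (frame : List (Int × Int × Int)) (e : Int × Int × Int) :
    (place frame e).Perm (e :: frame) := by
  induction frame with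
  | nil => simp [place]
  | cons f fs ih =>
    rw [place]
    split
    · exact ((ih.cons f).trans (List.Perm.swap e f fs))
    · exact List.Perm.refl _

lemma mem_place {frame : List (Int × Int × Int)} {e g : Int × Int × Int}
    (h : g ∈ place frame e) : g = e ∨ g ∈ frame := by
  have := (place_perm frame e).mem_iff.mp h
  simpa using this

lemma place_sorted (frame : List (Int × Int × Int)) (e : Int × Int × Int)
    (hs : frame.Pairwise (fun a b => lt3 a b = true))
    (hne : ∀ f ∈ frame, f ≠ e) :
    (place frame e).Pairwise (fun a b => lt3 a b = true) := by
  induction frame with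
  | nil => simp [place]
  | cons f fs ih =>
    rw [List.pairwise_cons] at hs
    obtain ⟨hf, hfs⟩ := hs
    rw [place]
    by_cases hfe : lt3 f e = true
    · rw [if_pos hfe]
      rw [List.pairwise_cons]
      refine ⟨?_, ih hfs (fun g hg => hne g (List.mem_cons_of_mem f hg))⟩
      intro g hg
      rcases mem_place hg with rfl | hg
      · exact hfe
      · exact hf g hg
    · rw [if_neg hfe]
      have hef : lt3 e f = true := by
        rcases lt3_total (hne f List.mem_cons_self) with h | h
        · exact absurd h hfe
        · exact h
      rw [List.pairwise_cons]
      constructor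
      · intro g hg
        rcases List.mem_cons.mp hg with rfl | hg
        · exact hef
        · exact lt3_trans hef (hf g hg)
      · exact List.pairwise_cons.mpr ⟨hf, hfs⟩

-- basic facts about ann
lemma ann_length {L : List (Int × Int)} {qs : List Int} (h : qs.length = L.length) :
    (ann L qs).length = L.length := by
  simp only [ann, List.length_zipWith]
  omega

lemma ann_append {L1 L2 : List (Int × Int)} {qs1 qs2 : List Int} (h : qs1.length = L1.length) :
    ann (L1 ++ L2) (qs1 ++ qs2) = ann L1 qs1 ++ ann L2 qs2 := by
  induction L1 generalizing qs1 with
  | nil =>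
    cases qs1 with
    | nil => simp [ann]
    | cons q qs1 => simp at h
  | cons p L1 ih =>
    cases qs1 with
    | nil => simp at h
    | cons q qs1 =>
      simp only [List.length_cons] at h
      simp only [ann, List.cons_append, List.zipWith_cons_cons] at *
      exact congrArg _ (ih (by omega))

lemma map_thd_ann {L : List (Int × Int)} {qs : List Int} (h : qs.length = L.length) :
    (ann L qs).map (fun e => e.2.2) = L.map (fun p => p.1) := by
  induction L generalizing qs with
  | nil => simp [ann]
  | cons p L ih =>
    cases qs with
    | nil => simp at h
    | cons q qs =>
      simp only [List.length_cons] at h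
      simp only [ann, List.zipWith_cons_cons, List.map_cons]
      exact congrArg _ (ih (by omega))

lemma map_q_ann {L : List (Int × Int)} {qs : List Int} (h : qs.length = L.length) :
    (ann L qs).map (fun e => e.2.1) = qs := by
  induction L generalizing qs with
  | nil => cases qs with
    | nil => simp [ann]
    | cons q qs => simp at h
  | cons p L ih =>
    cases qs with
    | nil => simp at h
    | cons q qs =>
      simp only [List.length_cons] at h
      simp only [ann, List.zipWith_cons_cons, List.map_cons]
      exact congrArg _ (ih (by omega))

lemma mem_ann_decomp {L : List (Int × Int)} {qs : List Int} {e : Int × Int × Int}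
    (hlen : qs.length = L.length) (h : e ∈ ann L qs) :
    ∃ L1 L2 qs1 qs2, L = L1 ++ (e.2.2, e.1) :: L2 ∧ qs = qs1 ++ e.2.1 :: qs2 ∧
      qs1.length = L1.length ∧ qs2.length = L2.length := by
  induction L generalizing qs with
  | nil => simp [ann] at h
  | cons p L ih =>
    cases qs with
    | nil => simp at hlen
    | cons q qs =>
      simp only [ann, List.zipWith_cons_cons, List.mem_cons] at h
      rcases h with rfl | h
      · exact ⟨[], L, [], qs, by simp, by simp, rfl, by simp only [List.length_cons] at hlen; omega⟩
      · obtain ⟨L1, L2, qs1, qs2, hL, hqs, h1, h2⟩ := ih (qs := qs)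
          (by simp only [List.length_cons] at hlen; omega) h
        exact ⟨p :: L1, L2, q :: qs1, qs2, by simp [hL], by simp [hqs], by simp [h1], h2⟩

lemma mem_ann_of_mem {L : List (Int × Int)} {qs : List Int} {y : Int × Int}
    (hlen : qs.length = L.length) (h : y ∈ L) :
    ∃ q ∈ qs, (y.2, q, y.1) ∈ ann L qs := by
  induction L generalizing qs with
  | nil => simp at h
  | cons p L ih =>
    cases qs with
    | nil => simp at hlen
    | cons q qs =>
      rcases List.mem_cons.mp h with rfl | h
      · exact ⟨q, List.mem_cons_self, by simp [ann]⟩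
      · obtain ⟨q', hq', hm⟩ := ih (qs := qs)
          (by simp only [List.length_cons] at hlen; omega) h
        exact ⟨q', List.mem_cons_of_mem _ hq', List.mem_cons_of_mem _ hm⟩

-- the min?-characterisation: the first element whose key is minimal
lemma foldl_mstep_keep {α : Type} (key : α → Int) (x : α) (L2 : List α)
    (h : ∀ y ∈ L2, ¬ key y < key x) :
    L2.foldl (fun acc a => match acc with
      | none => some a
      | some m => if key a < key m then some a else some m) (some x) = some x := by
  induction L2 with
  | nil => rfl
  | cons y L2 ih =>
    simp only [List.foldl_cons]
    rw [if_neg (h y List.mem_cons_self)]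
    exact ih (fun z hz => h z (List.mem_cons_of_mem y hz))

lemma foldl_mstep_gt {α : Type} (key : α → Int) (x : α) (L2 : List α)
    (h2 : ∀ y ∈ L2, ¬ key y < key x) :
    ∀ L1 : List α, (∀ y ∈ L1, key x < key y) → ∀ m, key x < key m →
    (L1 ++ x :: L2).foldl (fun acc a => match acc with
      | none => some a
      | some m => if key a < key m then some a else some m) (some m) = some x := by
  intro L1
  induction L1 with
  | nil =>
    intro _ m hm
    simp only [List.nil_append, List.foldl_cons]
    rw [if_pos hm]
    exact foldl_mstep_keep key x L2 h2
  | cons y L1 ih =>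
    intro h1 m hm
    simp only [List.cons_append, List.foldl_cons]
    have hy := h1 y List.mem_cons_self
    by_cases hcmp : key y < key m
    · rw [if_pos hcmp]
      exact ih (fun z hz => h1 z (List.mem_cons_of_mem y hz)) y hy
    · rw [if_neg hcmp]
      exact ih (fun z hz => h1 z (List.mem_cons_of_mem y hz)) m hm

lemma min?_first {α : Type} (key : α → Int) (L1 : List α) (x : α) (L2 : List α)
    (h1 : ∀ y ∈ L1, key x < key y) (h2 : ∀ y ∈ L2, key x ≤ key y) :
    PySem.List.min? (L1 ++ x :: L2) key = some x := by
  have h2' : ∀ y ∈ L2, ¬ key y < key x := fun y hy => not_lt.mpr (h2 y hy)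
  cases L1 with
  | nil =>
    show (([] ++ x :: L2).foldl _ none) = some x
    simp only [List.nil_append, List.foldl_cons]
    exact foldl_mstep_keep key x L2 h2'
  | cons y L1 =>
    show (((y :: L1) ++ x :: L2).foldl _ none) = some x
    simp only [List.cons_append, List.foldl_cons]
    exact foldl_mstep_gt key x L2 h2' L1
      (fun z hz => h1 z (List.mem_cons_of_mem y hz)) y (h1 y List.mem_cons_self)

lemma ann_cons (p : Int × Int) (L : List (Int × Int)) (q : Int) (qs : List Int) :
    ann (p :: L) (q :: qs) = (p.2, q, p.1) :: ann L qs := rfl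

lemma nodup_append_fresh {M L : List (Int × Int)} {s : Int}
    (hnd : (L.map Prod.fst).Nodup) (hsub : M.Sublist L) (hs : s ∉ L.map Prod.fst) :
    (((M ++ [(s, (1 : Int))]).map Prod.fst)).Nodup := by
  rw [List.map_append]
  have hMnd : (M.map Prod.fst).Nodup := hnd.sublist (hsub.map _)
  have hsM : s ∉ M.map Prod.fst := fun h => hs ((hsub.map Prod.fst).subset h)
  refine hMnd.append (by simp) ?_
  intro a ha hb
  simp only [List.map_cons, List.map_nil, List.mem_singleton] at hb
  exact hsM (hb ▸ ha)

lemma nodup_refStep (n : Int) (L : List (Int × Int)) (s : Int)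
    (hnd : (L.map Prod.fst).Nodup) : ((refStep n L s).map Prod.fst).Nodup := by
  rw [refStep]
  by_cases hany : L.any (fun e => e.1 == s) = true
  · rw [if_pos hany]
    have heq : (L.map (fun e => if e.1 == s then (e.1, e.2 + 1) else e)).map Prod.fst
        = L.map Prod.fst := by
      rw [List.map_map]
      apply List.map_congr_left
      intro p _
      by_cases h : p.1 = s <;> simp [h]
    rw [heq]; exact hnd
  · rw [if_neg hany]
    have hs : s ∉ L.map Prod.fst := by
      intro hmem
      obtain ⟨p, hp, hps⟩ := List.mem_map.mp hmem
      exact hany (List.any_eq_true.mpr ⟨p, hp, by simp [hps]⟩)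
    by_cases hfull : n ≤ (L.length : Int)
    · rw [if_pos hfull]
      cases hmin : PySem.List.min? L (fun e => e.2) with
      | none => exact nodup_append_fresh hnd (List.Sublist.refl L) hs
      | some v => exact nodup_append_fresh hnd List.filter_sublist hs
    · rw [if_neg hfull]
      exact nodup_append_fresh hnd (List.Sublist.refl L) hs

-- every timestamp in the frame is below the clock
lemma frame_q_lt {L : List (Int × Int)} {qs : List Int} {frame : List (Int × Int × Int)} {t : Int}
    (hlen : qs.length = L.length) (hperm : frame.Perm (ann L qs)) (hqt : ∀ q ∈ qs, q < t) :
    ∀ f ∈ frame, f.2.1 < t := by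
  intro f hf
  have : f.2.1 ∈ frame.map (fun e => e.2.1) := List.mem_map_of_mem hf
  have hq : f.2.1 ∈ qs := by
    have hp := hperm.map (fun e => e.2.1)
    rw [map_q_ann hlen] at hp
    exact hp.subset this
  exact hqt _ hq

lemma step2 (n : Int) (L : List (Int × Int)) (st : List (Int × Int × Int) × Int) (s : Int)
    (hnd : (L.map Prod.fst).Nodup) (hinv : SimInv L st.1 st.2) :
    SimInv (refStep n L s) (solAltStep n st s).1 (solAltStep n st s).2 := by
  obtain ⟨frame, t⟩ := st
  simp only at hinv ⊢
  obtain ⟨qs, hlen, hqp, hqt, hperm, hsort⟩ := hinv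
  have hqmapP : (frame.map (fun e => e.2.1)).Perm qs := by
    have := hperm.map (fun e => e.2.1); rwa [map_q_ann hlen] at this
  have hqnd : (frame.map (fun e => e.2.1)).Nodup :=
    hqmapP.nodup_iff.mpr (hqp.imp (fun h => ne_of_lt h))
  have hann_nd : (ann L qs).Nodup := by
    have h1 : ((ann L qs).map (fun e => e.2.1)).Nodup := by
      rw [map_q_ann hlen]; exact hqp.imp (fun h => ne_of_lt h)
    exact h1.of_map
  have hidsP : (frame.map (fun e => e.2.2)).Perm (L.map Prod.fst) := by
    have := hperm.map (fun e => e.2.2); rwa [map_thd_ann hlen] at this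
  have hflen : frame.length = L.length := by
    rw [hperm.length_eq, ann_length hlen]
  have hqlt : ∀ f ∈ frame, f.2.1 < t := frame_q_lt hlen hperm hqt
  by_cases hany : L.any (fun e => e.1 == s) = true
  · -- s is already in the frame: the reference bumps its count in place,
    -- B moves the unique hit to its new rank
    obtain ⟨p, hp, hps⟩ := List.any_eq_true.mp hany
    have hsid : s ∈ frame.map (fun e => e.2.2) :=
      hidsP.mem_iff.mpr (List.mem_map.mpr ⟨p, hp, by simpa using hps⟩)
    obtain ⟨e0, he0, he0s⟩ := List.mem_map.mp hsid
    have hfindSome : (frame.find? (fun e => e.2.2 == s)).isSome :=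
      List.find?_isSome.mpr ⟨e0, he0, by simp [he0s]⟩
    obtain ⟨hit, hfind⟩ := Option.isSome_iff_exists.mp hfindSome
    have hhit_mem : hit ∈ frame := List.mem_of_find?_eq_some hfind
    have hhit_s : hit.2.2 = s := by simpa using List.find?_some hfind
    obtain ⟨L1, L2, qs1, qs2, hL, hqs, hlen1, hlen2⟩ :=
      mem_ann_decomp hlen (hperm.subset hhit_mem)
    rw [hhit_s] at hL
    have hannEq : ann L qs = ann L1 qs1 ++ hit :: ann L2 qs2 := by
      rw [hL, hqs, ann_append hlen1, ann_cons]
      have heta : ((s, hit.1).2, hit.2.1, (s, hit.1).1) = hit := by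
        obtain ⟨c, q, i⟩ := hit; simp only at hhit_s; simp [hhit_s]
      rw [heta]
    have hndparts := List.nodup_append.mp (by rw [hL, List.map_append, List.map_cons] at hnd; exact hnd)
    have hs1 : ∀ y ∈ L1, y.1 ≠ s := by
      intro y hy hns
      exact hndparts.2.2 y.1 (List.mem_map_of_mem hy) y.1 (by simp [hns]) rfl
    have hs2 : ∀ y ∈ L2, y.1 ≠ s := by
      intro y hy hns
      have hm : s ∈ List.map Prod.fst L2 := hns ▸ List.mem_map_of_mem hy
      exact (List.nodup_cons.mp hndparts.2.1).1 hm
    have hrefEq : refStep n L s = L1 ++ (s, hit.1 + 1) :: L2 := by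
      rw [refStep, if_pos hany, hL, List.map_append, List.map_cons]
      congr 1
      · exact (List.map_congr_left (fun y hy => by simp [hs1 y hy])).trans (List.map_id L1)
      · congr 1
        · simp
        · exact (List.map_congr_left (fun y hy => by simp [hs2 y hy])).trans (List.map_id L2)
    have hann' : ann (L1 ++ (s, hit.1 + 1) :: L2) qs
        = ann L1 qs1 ++ (hit.1 + 1, hit.2.1, s) :: ann L2 qs2 := by
      rw [hqs, ann_append hlen1, ann_cons]
    have hannparts := List.nodup_append.mp (hannEq ▸ hann_nd)
    have hhitX : hit ∉ ann L1 qs1 := fun h => hannparts.2.2 hit h hit List.mem_cons_self rfl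
    have hhitY : hit ∉ ann L2 qs2 := (List.nodup_cons.mp hannparts.2.1).1
    have hfilterEq : (ann L qs).filter (fun e => e != hit) = ann L1 qs1 ++ ann L2 qs2 := by
      rw [hannEq, List.filter_append, List.filter_cons]
      have hmid : ((hit != hit) = true) = False := by simp
      rw [if_neg (by simp)]
      congr 1
      · exact List.filter_eq_self.mpr (fun a ha => by
          simp only [bne_iff_ne, ne_eq]
          intro heq; exact hhitX (heq ▸ ha))
      · exact List.filter_eq_self.mpr (fun a ha => by
          simp only [bne_iff_ne, ne_eq]
          intro heq; exact hhitY (heq ▸ ha))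
    have hfilterPerm : (frame.filter (fun e => e != hit)).Perm (ann L1 qs1 ++ ann L2 qs2) := by
      rw [← hfilterEq]; exact hperm.filter _
    have hne' : ∀ f ∈ frame.filter (fun e => e != hit), f ≠ (hit.1 + 1, hit.2.1, s) := by
      intro f hf heq
      have hfmem := List.mem_of_mem_filter hf
      have hfq : f.2.1 = hit.2.1 := by rw [heq]
      have : f = hit := List.inj_on_of_nodup_map hqnd hfmem hhit_mem hfq
      have hne := (List.mem_filter.mp hf).2
      rw [this] at hne; simp at hne
    simp only [solAltStep, hfind, hrefEq]
    refine ⟨qs, ?_, hqp, hqt, ?_, ?_⟩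
    · have := congrArg List.length hL
      simp only [List.length_append, List.length_cons] at this ⊢
      omega
    · rw [hann']
      exact ((place_perm _ _).trans (hfilterPerm.cons _)).trans List.perm_middle.symm
    · exact place_sorted _ _ (hsort.sublist List.filter_sublist) hne'
  · -- s is new: the reference appends (s, 1) (evicting its first minimal-count
    -- entry if full), B pops the head (the lex-minimal triple) and places (1, t, s)
    have hnomem : ∀ p ∈ L, p.1 ≠ s := by
      intro p hp hps
      exact hany (List.any_eq_true.mpr ⟨p, hp, by simp [hps]⟩)
    have hfind : frame.find? (fun e => e.2.2 == s) = none := by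
      apply List.find?_eq_none.mpr
      intro e he
      simp only [beq_iff_eq]
      intro hes
      have : e.2.2 ∈ L.map Prod.fst := hidsP.subset (List.mem_map_of_mem he)
      obtain ⟨p, hp, hpe⟩ := List.mem_map.mp this
      exact hnomem p hp (by rw [hpe, hes])
    simp only [solAltStep, hfind]
    rw [refStep, if_neg hany]
    by_cases hfull : n ≤ (L.length : Int)
    · have hfullB : n ≤ ((frame.length : Nat) : Int) := by rw [hflen]; exact hfull
      rw [if_pos hfull, if_pos hfullB]
      by_cases hLnil : L = []
      · subst hLnil
        have hqsnil : qs = [] := List.length_eq_zero_iff.mp (by simpa using hlen)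
        have hfnil : frame = [] := hperm.eq_nil
        subst hqsnil; subst hfnil
        rw [(PySem.List.min?_eq_none_iff ([] : List (Int × Int)) (fun e => e.2)).mpr rfl]
        show SimInv [(s, 1)] [(1, t, s)] (t + 1)
        refine ⟨[t], rfl, List.pairwise_singleton _ _, ?_, List.Perm.refl _,
          List.pairwise_singleton _ _⟩
        intro q hq
        rw [List.mem_singleton] at hq
        omega
      · have hfne : frame ≠ [] := by
          intro h; rw [h] at hflen; exact hLnil (List.length_eq_zero_iff.mp hflen.symm)
        obtain ⟨h, rest, hst⟩ := List.exists_cons_of_ne_nil hfne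
        subst hst
        obtain ⟨L1, L2, qs1, qs2, hL, hqs, hlen1, hlen2⟩ :=
          mem_ann_decomp hlen (hperm.subset List.mem_cons_self)
        have hannEq : ann L qs = ann L1 qs1 ++ h :: ann L2 qs2 := by
          rw [hL, hqs, ann_append hlen1, ann_cons]
        have hqparts := List.pairwise_append.mp (hqs ▸ hqp)
        have hcross : ∀ q ∈ qs1, q < h.2.1 :=
          fun q hq => hqparts.2.2 q hq h.2.1 List.mem_cons_self
        have hq2 : ∀ q ∈ qs2, h.2.1 < q :=
          fun q hq => (List.pairwise_cons.mp hqparts.2.1).1 q hq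
        have hltall : ∀ e ∈ ann L qs, e = h ∨ lt3 h e = true := by
          intro e he
          have hef : e ∈ h :: rest := hperm.mem_iff.mpr he
          rcases List.mem_cons.mp hef with rfl | hef
          · exact Or.inl rfl
          · exact Or.inr ((List.pairwise_cons.mp hsort).1 e hef)
        have h1 : ∀ y ∈ L1, (h.2.2, h.1).2 < y.2 := by
          intro y hy
          obtain ⟨q, hq, hmem⟩ := mem_ann_of_mem hlen1 hy
          have hqlt' : q < h.2.1 := hcross q hq
          have hmem' : (y.2, q, y.1) ∈ ann L qs := by
            rw [hannEq]; exact List.mem_append_left _ hmem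
          rcases hltall _ hmem' with heq | hlt
          · exfalso
            have hqeq : q = h.2.1 := by rw [← heq]
            omega
          · simp only [lt3, decide_eq_true_eq] at hlt
            show h.1 < y.2
            omega
        have h2 : ∀ y ∈ L2, (h.2.2, h.1).2 ≤ y.2 := by
          intro y hy
          obtain ⟨q, hq, hmem⟩ := mem_ann_of_mem hlen2 hy
          have hmem' : (y.2, q, y.1) ∈ ann L qs := by
            rw [hannEq]
            exact List.mem_append_right _ (List.mem_cons_of_mem _ hmem)
          rcases hltall _ hmem' with heq | hlt
          · have hyeq : y.2 = h.1 := by rw [← heq]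
            show h.1 ≤ y.2
            omega
          · simp only [lt3, decide_eq_true_eq] at hlt
            show h.1 ≤ y.2
            omega
        have hmin : PySem.List.min? L (fun e => e.2) = some (h.2.2, h.1) := by
          rw [hL]; exact min?_first _ L1 _ L2 h1 h2
        rw [hmin]
        change SimInv (List.filter (fun e => e != (h.2.2, h.1)) L ++ [(s, 1)])
          (place (PySem.List.slice (h :: rest) (some 1) none) (1, t, s)) (t + 1)
        have hLnd : L.Nodup := hnd.of_map
        have hLparts := List.nodup_append.mp (hL ▸ hLnd)
        have hvX : (h.2.2, h.1) ∉ L1 := fun hm => hLparts.2.2 _ hm _ List.mem_cons_self rfl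
        have hvY : (h.2.2, h.1) ∉ L2 := (List.nodup_cons.mp hLparts.2.1).1
        have hfilterEq : L.filter (fun e => e != (h.2.2, h.1)) = L1 ++ L2 := by
          rw [hL, List.filter_append, List.filter_cons]
          rw [if_neg (by simp)]
          congr 1
          · exact List.filter_eq_self.mpr (fun a ha => by
              simp only [bne_iff_ne, ne_eq]
              intro heq; exact hvX (heq ▸ ha))
          · exact List.filter_eq_self.mpr (fun a ha => by
              simp only [bne_iff_ne, ne_eq]
              intro heq; exact hvY (heq ▸ ha))
        rw [hfilterEq, PySem.List.slice_from_one, List.tail_cons]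
        have hrestPerm : rest.Perm (ann L1 qs1 ++ ann L2 qs2) := by
          have hp1 : (h :: rest).Perm (h :: (ann L1 qs1 ++ ann L2 qs2)) :=
            hperm.trans (hannEq ▸ List.perm_middle)
          exact hp1.cons_inv
        refine ⟨(qs1 ++ qs2) ++ [t], ?_, ?_, ?_, ?_, ?_⟩
        · have hlL := congrArg List.length hL
          have hlq := congrArg List.length hqs
          simp only [List.length_append, List.length_cons, List.length_nil] at hlL hlq ⊢
          omega
        · refine List.pairwise_append.mpr ⟨?_, by simp, ?_⟩
          · exact List.pairwise_append.mpr ⟨hqparts.1,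
              (List.pairwise_cons.mp hqparts.2.1).2,
              fun a ha b hb => hqparts.2.2 a ha b (List.mem_cons_of_mem _ hb)⟩
          · intro a ha b hb
            rw [List.mem_singleton] at hb
            subst hb
            have : a ∈ qs := by
              rw [hqs]
              rcases List.mem_append.mp ha with h' | h'
              · exact List.mem_append_left _ h'
              · exact List.mem_append_right _ (List.mem_cons_of_mem _ h')
            exact hqt a this
        · intro q hq
          rcases List.mem_append.mp hq with h' | h'
          · have : q ∈ qs := by
              rw [hqs]
              rcases List.mem_append.mp h' with h'' | h''
              · exact List.mem_append_left _ h''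
              · exact List.mem_append_right _ (List.mem_cons_of_mem _ h'')
            have := hqt q this
            omega
          · rw [List.mem_singleton] at h'
            omega
        · rw [ann_append (by simp only [List.length_append]; omega), ann_append hlen1]
          refine (place_perm _ _).trans ?_
          refine ((hrestPerm.cons _).trans ?_)
          exact (List.perm_append_singleton _ _).symm
        · refine place_sorted _ _ (List.pairwise_cons.mp hsort).2 ?_
          intro f hf heq
          have : f.2.1 < t := hqlt f (List.mem_cons_of_mem _ hf)
          rw [heq] at this
          simp at this
    · have hfullB : ¬ n ≤ ((frame.length : Nat) : Int) := by rw [hflen]; exact hfull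
      rw [if_neg hfull, if_neg hfullB]
      refine ⟨qs ++ [t], ?_, ?_, ?_, ?_, ?_⟩
      · simp only [List.length_append, List.length_cons, List.length_nil]
        omega
      · refine List.pairwise_append.mpr ⟨hqp, by simp, ?_⟩
        intro a ha b hb
        rw [List.mem_singleton] at hb
        subst hb
        exact hqt a ha
      · intro q hq
        rcases List.mem_append.mp hq with h' | h'
        · have := hqt q h'; omega
        · rw [List.mem_singleton] at h'; omega
      · rw [ann_append hlen]
        exact (place_perm _ _).trans ((hperm.cons _).trans (List.perm_append_singleton _ _).symm)
      · refine place_sorted _ _ hsort ?_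
        intro f hf heq
        have : f.2.1 < t := hqlt f hf
        rw [heq] at this
        simp at this

lemma loop2 (n : Int) (rest : List Int) (L : List (Int × Int))
    (st : List (Int × Int × Int) × Int)
    (hnd : (L.map Prod.fst).Nodup) (hinv : SimInv L st.1 st.2) :
    PySem.List.sorted ((rest.foldl (refStep n) L).map (fun e => e.1)) (fun i => i) false =
      PySem.List.sorted (((rest.foldl (solAltStep n) st).1).map (fun e => e.2.2)) (fun i => i) false := by
  induction rest generalizing L st with
  | nil =>
    obtain ⟨qs, hlen, _, _, hperm, _⟩ := hinv
    have h1 : (st.1.map (fun e => e.2.2)).Perm (L.map (fun p => p.1)) := by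
      have := hperm.map (fun e => e.2.2)
      rwa [map_thd_ann hlen] at this
    rw [List.foldl_nil, List.foldl_nil]
    exact (PySem.List.sorted_eq_sorted_of_perm _ _ (fun i => i)
      (fun a b h => h) h1).symm
  | cons s rest ih =>
    rw [List.foldl_cons, List.foldl_cons]
    exact ih (refStep n L s) (solAltStep n st s) (nodup_refStep n L s hnd)
      (step2 n L st s hnd hinv)

-- ===== VERDICT (by name: the statement is the Claim_ definition above) =====
theorem solution_spec : Claim_equal_solution := by
  intro n data _ hpre
  show solution n data = solution_alt n data
  have hlink : PySem.List.sorted ((data.foldl (refStep n) PySem.Dict.empty.items).map (fun e => e.1)) (fun i => i) false = solution_alt n data := by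
    apply loop2 n data _ ([], 0)
    · simp [PySem.Dict.empty]
    · exact ⟨[], by simp [PySem.Dict.empty], List.Pairwise.nil,
        by simp, by simp [ann, PySem.Dict.empty], List.Pairwise.nil⟩
  rw [← hlink]
  rcases hpre with hnil | ⟨hn, hded | hpos⟩
  · subst hnil; rfl
  · refine loop_small n data PySem.Dict.empty ?_ PySem.Dict.nodup_keys_empty
    rw [PySem.List.dedup_eq_ofList] at hded
    exact hded
  · refine loop_pos n data PySem.Dict.empty hn hpos ?_ PySem.Dict.nodup_keys_empty
    intro k hk
    simp [PySem.Dict.empty, PySem.Dict.keys] at hk
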